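-- pv_equiv track=rewrite | github.com/ModelInference/texada | quarry-src/trace-preprocessor.py | all_ordered_sublists
-- ===== SOURCE A (Python) =====
-- def all_ordered_sublists(to_sublist):
--    if (len(to_sublist) == 0):
--        return [[]]
--    else:
--      retlist = []
--      sublist_iteration = all_ordered_sublists(to_sublist[1:])
--      for sublist in sublist_iteration:
--          retlist.append(sublist)
--          retlist.append([to_sublist[0]] + sublist)
--      return retlist
-- ===== SOURCE B (Python) =====
-- def all_ordered_sublists(to_sublist):
--     result = [[]]
--     for x in reversed(to_sublist):
--         result = [v for s in result for v in (s, [x] + s)]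
--     return result
-- ===== Notes on version B (the rewrite author's own statement) =====
-- stated objective: simpler
-- what changed: Replaces the recursion on the tail by a single iterative fold over the reversed list, rebuilding the result list with a flat comprehension instead of a recursive call plus append loop.
import Mathlib
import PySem

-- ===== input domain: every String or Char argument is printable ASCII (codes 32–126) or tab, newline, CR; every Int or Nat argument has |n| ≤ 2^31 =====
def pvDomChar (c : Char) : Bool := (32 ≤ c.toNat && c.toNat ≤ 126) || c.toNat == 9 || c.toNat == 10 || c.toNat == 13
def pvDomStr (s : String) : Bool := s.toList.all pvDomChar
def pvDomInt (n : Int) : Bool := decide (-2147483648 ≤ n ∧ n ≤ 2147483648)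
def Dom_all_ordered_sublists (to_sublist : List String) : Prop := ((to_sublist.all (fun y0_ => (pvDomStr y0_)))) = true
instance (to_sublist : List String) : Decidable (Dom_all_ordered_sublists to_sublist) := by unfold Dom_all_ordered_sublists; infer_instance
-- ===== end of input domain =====

-- B folds iteratively over the reversed list instead of recursing on the tail (simpler decomposition, same cost).
-- ===== PORT A =====
def all_ordered_sublists (to_sublist : List String) : List (List String) :=
  match to_sublist with
  | [] => [[]]
  | x :: xs =>
    (all_ordered_sublists xs).foldl (fun retlist sublist => retlist ++ [sublist, x :: sublist]) []

-- ===== PORT B =====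
def all_ordered_sublists_alt (to_sublist : List String) : List (List String) :=
  to_sublist.reverse.foldl (fun result x => result.flatMap (fun s => [s, x :: s])) [[]]

-- ===== PRECONDITION & SPEC =====
def Spec_all_ordered_sublists (to_sublist : List String) (out : List (List String)) : Prop := out = all_ordered_sublists_alt to_sublist
instance (to_sublist : List String) (out : List (List String)) : Decidable (Spec_all_ordered_sublists to_sublist out) := by unfold Spec_all_ordered_sublists; infer_instance

-- ===== CLAIM (what is proved, stated in full; the proofs are below) =====
def Claim_equal_all_ordered_sublists : Prop := ∀ (to_sublist : List String), Dom_all_ordered_sublists to_sublist → Spec_all_ordered_sublists to_sublist (all_ordered_sublists to_sublist)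

-- ===== LEMMAS AND PROOFS =====

theorem alt_cons (x : String) (xs : List String) :
    all_ordered_sublists_alt (x :: xs) =
      (all_ordered_sublists_alt xs).flatMap (fun s => [s, x :: s]) := by
  simp [all_ordered_sublists_alt, List.foldl_append]

theorem a_eq_alt (to_sublist : List String) :
    all_ordered_sublists to_sublist = all_ordered_sublists_alt to_sublist := by
  induction to_sublist with
  | nil => rfl
  | cons x xs ih =>
    rw [alt_cons, ← ih]
    show (all_ordered_sublists xs).foldl (fun retlist sublist => retlist ++ [sublist, x :: sublist]) []
        = (all_ordered_sublists xs).flatMap (fun s => [s, x :: s])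
    simpa using PySem.List.foldl_append_eq_flatMap (fun s => [s, x :: s]) (all_ordered_sublists xs) []

-- ===== VERDICT =====
theorem all_ordered_sublists_spec : Claim_equal_all_ordered_sublists := by
  intro l _
  exact a_eq_alt l
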